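-- pv_equiv track=rewrite | github.com/SimeonChifligarov/Alpha_Judge_Softuni | Python_Fundamentals/Python_Fundamentals/01_02_Basic_Syntax_Conditional_Statements_and_Loops_Exercise/10_Mutate_Strings_v3.py | transform_strings
-- ===== SOURCE A (Python) =====
-- def transform_strings(original, target):
--     result = list(original)
--     last_printed = original
--     transformations = []
--     for i in range(len(original)):
--         if result[i] != target[i]:
--             result[i] = target[i]
--             current_string = ''.join(result)
--             if current_string != last_printed:
--                 transformations.append(current_string)
--                 last_printed = current_string
--     return transformations
-- ===== SOURCE B (Python) =====
-- def transform_strings(original, target):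
--     # Each snapshot is computed directly: target prefix glued to the
--     # untouched original suffix; no mutable char list, no join, no dedup.
--     return [target[:i + 1] + original[i + 1:]
--             for i in range(len(original)) if original[i] != target[i]]
-- ===== Notes on version B (the rewrite author's own statement) =====
-- stated objective: simpler
-- what changed: Replaces the mutable character list, repeated ''.join and last_printed dedup variable by a single comprehension that computes each emitted snapshot directly as target[:i+1] + original[i+1:] (the dedup check is provably always true in A).
import Mathlib
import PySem

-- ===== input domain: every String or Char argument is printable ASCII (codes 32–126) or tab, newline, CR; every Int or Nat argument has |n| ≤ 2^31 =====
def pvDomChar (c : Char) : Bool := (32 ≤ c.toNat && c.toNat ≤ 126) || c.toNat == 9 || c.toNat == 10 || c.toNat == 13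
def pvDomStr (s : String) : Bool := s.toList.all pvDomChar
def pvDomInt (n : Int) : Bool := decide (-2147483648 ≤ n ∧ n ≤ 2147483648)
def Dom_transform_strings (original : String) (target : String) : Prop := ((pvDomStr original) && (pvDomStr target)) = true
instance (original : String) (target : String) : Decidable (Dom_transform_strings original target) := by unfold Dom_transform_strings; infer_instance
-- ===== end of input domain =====

-- B replaces A's mutable char list, running join and last_printed dedup by a single
-- comprehension emitting target[:i+1] + original[i+1:] at each differing index (simpler).


-- ===== PORT A =====
-- state: (result, last_printed, transformations); indices are in range under Pre_
def transformStringsStep (target : List Char)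
    (st : List Char × String × List String) (i : Nat) :
    List Char × String × List String :=
  let result := st.1
  let last_printed := st.2.1
  let transformations := st.2.2
  if result.getD i ' ' ≠ target.getD i ' ' then
    let result' := result.set i (target.getD i ' ')
    let current_string := String.ofList result'
    if current_string ≠ last_printed then
      (result', current_string, transformations ++ [current_string])
    else
      (result', last_printed, transformations)
  else
    (result, last_printed, transformations)

def transform_strings (original : String) (target : String) : List String :=
  ((List.range original.toList.length).foldl
    (transformStringsStep target.toList)
    (original.toList, original, [])).2.2

-- ===== PORT B =====
def transform_strings_alt (original : String) (target : String) : List String :=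
  (List.range original.toList.length).filterMap (fun i =>
    if original.toList.getD i ' ' ≠ target.toList.getD i ' ' then
      some (String.ofList (target.toList.take (i + 1) ++ original.toList.drop (i + 1)))
    else none)

-- ===== PRECONDITION & SPEC =====
-- Pre_ excludes inputs with len(target) < len(original): there both A and B raise IndexError.
def Pre_transform_strings (original : String) (target : String) : Prop :=
  original.toList.length ≤ target.toList.length
instance (original : String) (target : String) : Decidable (Pre_transform_strings original target) := by unfold Pre_transform_strings; infer_instance

def pvWitness_transform_strings : String × String := ("abc", "axc")

def Spec_transform_strings (original : String) (target : String) (out : List String) : Prop := out = transform_strings_alt original target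
instance (original : String) (target : String) (out : List String) : Decidable (Spec_transform_strings original target out) := by unfold Spec_transform_strings; infer_instance

-- ===== CLAIM (what is proved, stated in full; the proofs are below) =====
def Claim_equal_transform_strings : Prop := ∀ (original : String) (target : String), Dom_transform_strings original target → Pre_transform_strings original target → Spec_transform_strings original target (transform_strings original target)

-- ===== LEMMAS AND PROOFS =====

-- Invariant: after the first k steps the state is
--   (t.take k ++ o.drop k, ofList (t.take k ++ o.drop k), B's output on range k)
theorem transform_strings_invariant (o t : List Char) (k : Nat)
    (hk : k ≤ o.length) (hlen : o.length ≤ t.length) :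
    (List.range k).foldl (transformStringsStep t) (o, String.ofList o, []) =
      (t.take k ++ o.drop k, String.ofList (t.take k ++ o.drop k),
        (List.range k).filterMap (fun i =>
          if o.getD i ' ' ≠ t.getD i ' ' then
            some (String.ofList (t.take (i + 1) ++ o.drop (i + 1)))
          else none)) := by
  induction k with
  | zero => simp
  | succ k ih =>
    have hk' : k ≤ o.length := Nat.le_of_succ_le hk
    have hko : k < o.length := hk
    have hkt : k < t.length := Nat.lt_of_lt_of_le hko hlen
    have htk : (t.take k).length = k := List.length_take_of_le (Nat.le_of_lt hkt)
    rw [List.range_succ, List.foldl_append, List.filterMap_append, ih hk']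
    have hdrop : o.drop k = o[k] :: o.drop (k + 1) := List.drop_eq_getElem_cons hko
    have htake : t.take (k + 1) = t.take k ++ [t[k]] := by
      rw [List.take_add_one, List.getElem?_eq_getElem hkt]; rfl
    have hgetmid : ∀ (c : Char) (l : List Char), (t.take k ++ (c :: l)).getD k ' ' = c := by
      intro c l
      rw [List.getD_eq_getElem?_getD, List.getElem?_append_right (le_of_eq htk), htk]
      simp
    have hgetres : (t.take k ++ o.drop k).getD k ' ' = o[k] := by
      rw [hdrop]; exact hgetmid _ _
    have hgett : t.getD k ' ' = t[k] := by
      rw [List.getD_eq_getElem?_getD, List.getElem?_eq_getElem hkt]; rfl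
    have hgeto : o.getD k ' ' = o[k] := by
      rw [List.getD_eq_getElem?_getD, List.getElem?_eq_getElem hko]; rfl
    have hset : (t.take k ++ o.drop k).set k (t[k]) = t.take (k + 1) ++ o.drop (k + 1) := by
      rw [List.set_append_right _ _ (le_of_eq htk), htk, htake, List.append_assoc, Nat.sub_self, hdrop]
      rfl
    simp only [List.foldl_cons, List.foldl_nil, List.filterMap_cons, List.filterMap_nil,
      transformStringsStep, hgetres, hgett, hgeto]
    by_cases hne : o[k] ≠ t[k]
    · have hcur : String.ofList (t.take (k + 1) ++ o.drop (k + 1)) ≠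
          String.ofList (t.take k ++ o.drop k) := by
        intro h
        have h' := congrArg String.toList h
        rw [String.toList_ofList, String.toList_ofList] at h'
        have h2 := congrArg (fun l => l.getD k ' ') h'
        simp only at h2
        rw [hgetres, htake, List.append_assoc, List.singleton_append] at h2
        rw [hgetmid t[k] (o.drop (k + 1))] at h2
        exact hne h2.symm
      rw [if_pos hne, hset, if_pos hcur]
      rw [if_pos hne]
    · rw [not_not] at hne
      rw [if_neg (by simp [hne])]
      have heq : t.take k ++ o.drop k = t.take (k + 1) ++ o.drop (k + 1) := by
        rw [htake, hdrop, hne, List.append_assoc]; rfl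
      rw [if_neg (by simp [hne]), heq]
      simp

-- ===== VERDICT (by name: the statement is the Claim_ definition above) =====
theorem transform_strings_spec : Claim_equal_transform_strings := by
  intro original target _ hpre
  unfold Spec_transform_strings transform_strings transform_strings_alt
  have h := transform_strings_invariant original.toList target.toList
    original.toList.length (le_refl _) hpre
  rw [String.ofList_toList] at h
  rw [h]
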